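-- pv_equiv track=rewrite | github.com/sdominguezr/Practices- | P01/Seq0.py | processing_genes
-- ===== SOURCE A (Python) =====
-- def processing_genes(filename, all_file_withn): #Ejercicio 8
--     all_file_list = []
--     for element in all_file_withn:
--         if element == "\n":
--             None
--         else:
--             element = element
--             all_file_list.append(element)
--     count_a = all_file_list.count("A")
--     count_c = all_file_list.count("C")
--     count_g = all_file_list.count("G")
--     count_t = all_file_list.count("T")
--     base = ["A", "C", "G", "T"]
--     count_list = [count_a,count_c,count_g, count_t ]
--     dict_count = dict(zip(count_list, base))
--     order_count = sorted(count_list)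
--     return ("The most common base in " + filename + " is " + dict_count[(order_count[-1])])
-- ===== SOURCE B (Python) =====
-- def processing_genes(filename, all_file_withn):  # one-pass tally + linear selection
--     a = c = g = t = 0
--     for element in all_file_withn:
--         if element == "A":
--             a += 1
--         elif element == "C":
--             c += 1
--         elif element == "G":
--             g += 1
--         elif element == "T":
--             t += 1
--     best, best_count = "A", a
--     for b, n in (("C", c), ("G", g), ("T", t)):
--         if n >= best_count:
--             best, best_count = b, n
--     return "The most common base in " + filename + " is " + best
-- ===== Notes on version B (the rewrite author's own statement) =====
-- stated objective: alternative
-- what changed: Replaced A's filtered-copy list, four separate .count scans and the sort-plus-{count:base}-dict trick by a single tallying pass over the input and a direct linear selection of the last base among A,C,G,T with the maximal count.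
import Mathlib
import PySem

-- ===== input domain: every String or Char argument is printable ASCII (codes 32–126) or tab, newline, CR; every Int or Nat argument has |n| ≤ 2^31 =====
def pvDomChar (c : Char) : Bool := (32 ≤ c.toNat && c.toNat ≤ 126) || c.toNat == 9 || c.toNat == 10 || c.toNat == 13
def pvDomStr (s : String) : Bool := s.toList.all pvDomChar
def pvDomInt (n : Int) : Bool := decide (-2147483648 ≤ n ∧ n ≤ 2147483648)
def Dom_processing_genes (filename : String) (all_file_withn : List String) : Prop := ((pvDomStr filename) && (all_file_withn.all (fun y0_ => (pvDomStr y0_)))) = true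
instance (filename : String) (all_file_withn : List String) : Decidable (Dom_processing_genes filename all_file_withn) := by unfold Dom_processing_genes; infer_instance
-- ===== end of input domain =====

-- B replaces A's filter-list plus four .count scans and sort-plus-dict trick by one tallying pass
-- and a direct linear selection (last base among A,C,G,T with the maximal count), returning the same string.

-- ===== PORT A =====
def processing_genes (filename : String) (all_file_withn : List String) : String :=
  let all_file_list : List String := all_file_withn.foldl
    (fun acc element => if element == "\n" then acc else acc ++ [element]) []
  let count_a : Int := (PySem.List.count all_file_list "A" : Int)
  let count_c : Int := (PySem.List.count all_file_list "C" : Int)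
  let count_g : Int := (PySem.List.count all_file_list "G" : Int)
  let count_t : Int := (PySem.List.count all_file_list "T" : Int)
  let base : List String := ["A", "C", "G", "T"]
  let count_list : List Int := [count_a, count_c, count_g, count_t]
  let dict_count := PySem.Dict.ofList (count_list.zip base)
  let order_count := PySem.List.sorted count_list (fun x => x) false
  -- order_count[-1] is exact: the list always has 4 elements, so the index is in range;
  -- dict_count[...] is exact: the maximal count is always one of the dict's keys, so no KeyError.
  "The most common base in " ++ filename ++ " is " ++
    dict_count.getD (PySem.List.pyGetD order_count (-1) 0) ""

-- ===== PORT B =====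
def processing_genes_alt (filename : String) (all_file_withn : List String) : String :=
  let counts : Int × Int × Int × Int := all_file_withn.foldl
    (fun s element =>
      if element == "A" then (s.1 + 1, s.2.1, s.2.2.1, s.2.2.2)
      else if element == "C" then (s.1, s.2.1 + 1, s.2.2.1, s.2.2.2)
      else if element == "G" then (s.1, s.2.1, s.2.2.1 + 1, s.2.2.2)
      else if element == "T" then (s.1, s.2.1, s.2.2.1, s.2.2.2 + 1)
      else s) (0, 0, 0, 0)
  let best := [("C", counts.2.1), ("G", counts.2.2.1), ("T", counts.2.2.2)].foldl
    (fun bp p => if bp.2 ≤ p.2 then p else bp) ("A", counts.1)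
  "The most common base in " ++ filename ++ " is " ++ best.1

-- ===== PRECONDITION & SPEC =====
def Spec_processing_genes (filename : String) (all_file_withn : List String) (out : String) : Prop := out = processing_genes_alt filename all_file_withn
instance (filename : String) (all_file_withn : List String) (out : String) : Decidable (Spec_processing_genes filename all_file_withn out) := by unfold Spec_processing_genes; infer_instance

-- ===== CLAIM (what is proved, stated in full; the proofs are below) =====
def Claim_equal_processing_genes : Prop := ∀ (filename : String) (all_file_withn : List String), Dom_processing_genes filename all_file_withn → Spec_processing_genes filename all_file_withn (processing_genes filename all_file_withn)

-- ===== LEMMAS AND PROOFS =====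

-- A's filter loop builds exactly List.filter (· != "\n").
theorem foldl_filter_newline (xs : List String) (acc : List String) :
    xs.foldl (fun acc element => if element == "\n" then acc else acc ++ [element]) acc
      = acc ++ xs.filter (fun e => !(e == "\n")) := by
  induction xs generalizing acc with
  | nil => simp
  | cons x xs ih =>
    simp only [List.foldl_cons, List.filter_cons]
    by_cases h : x == "\n"
    · rw [if_pos h, ih]; simp [h]
    · rw [if_neg h, ih]; simp [h]

-- B's tallying fold computes the four counts over the whole input.
theorem foldB_counts (xs : List String) (s : Int × Int × Int × Int) :
    xs.foldl (fun s element =>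
      if element == "A" then (s.1 + 1, s.2.1, s.2.2.1, s.2.2.2)
      else if element == "C" then (s.1, s.2.1 + 1, s.2.2.1, s.2.2.2)
      else if element == "G" then (s.1, s.2.1, s.2.2.1 + 1, s.2.2.2)
      else if element == "T" then (s.1, s.2.1, s.2.2.1, s.2.2.2 + 1)
      else s) s
    = (s.1 + (xs.count "A" : Int), s.2.1 + (xs.count "C" : Int),
       s.2.2.1 + (xs.count "G" : Int), s.2.2.2 + (xs.count "T" : Int)) := by
  induction xs generalizing s with
  | nil => simp
  | cons x xs ih =>
    simp only [List.foldl_cons, List.count_cons, ih]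
    by_cases hA : x == "A"
    · simp_all; omega
    · by_cases hC : x == "C"
      · simp_all; omega
      · by_cases hG : x == "G"
        · simp_all; omega
        · by_cases hT : x == "T" <;> simp_all <;> omega

-- In a (· ≤ ·)-pairwise list every element is at most the last one.
theorem le_getLast_of_pairwise {l : List Int} (hp : l.Pairwise (· ≤ ·)) (hne : l ≠ []) :
    ∀ x ∈ l, x ≤ l.getLast hne := by
  induction l with
  | nil => simp at hne
  | cons a l ih =>
    intro x hx
    rcases List.mem_cons.mp hx with rfl | hx'
    · cases l with
      | nil => simp [List.getLast]
      | cons b l' =>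
        have h1 : (b :: l').getLast (by simp) ∈ b :: l' := List.getLast_mem _
        have h2 := (List.pairwise_cons.mp hp).1 _ h1
        simpa [List.getLast_cons] using h2
    · cases l with
      | nil => simp at hx'
      | cons b l' =>
        have := ih (List.pairwise_cons.mp hp).2 (by simp) x hx'
        simpa [List.getLast_cons] using this

-- The dict-of-counts lookup at the maximum equals B's linear selection.
theorem dict_pick (a c g t m : Int) (hmem : m = a ∨ m = c ∨ m = g ∨ m = t)
    (ha : a ≤ m) (hc : c ≤ m) (hg : g ≤ m) (ht : t ≤ m) :
    (PySem.Dict.ofList ([((a:Int),"A"),(c,"C"),(g,"G"),(t,"T")])).getD m ""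
      = (([("C", c), ("G", g), ("T", t)]).foldl
          (fun bp p => if bp.2 ≤ p.2 then p else bp) ("A", (a:Int))).1 := by
  simp only [PySem.Dict.ofList, PySem.Dict.update, List.foldl, PySem.Dict.getD_insert,
    PySem.Dict.getD_empty]
  split_ifs <;> first | rfl | omega

-- Removing the "\n" entries does not change the count of any base.
theorem count_filter_newline (xs : List String) (v : String) (hv : v ≠ "\n") :
    List.count v (xs.filter (fun e => !(e == "\n"))) = List.count v xs :=
  List.count_filter (by simp [hv])

-- ===== VERDICT (by name: the statement is the Claim_ definition above) =====
theorem processing_genes_spec : Claim_equal_processing_genes := by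
  intro filename xs _
  unfold Spec_processing_genes processing_genes processing_genes_alt
  rw [foldl_filter_newline, foldB_counts]
  simp only [List.nil_append, PySem.List.count_eq,
    count_filter_newline xs "A" (by decide), count_filter_newline xs "C" (by decide),
    count_filter_newline xs "G" (by decide), count_filter_newline xs "T" (by decide),
    zero_add]
  set ca : Int := (List.count "A" xs : Int) with hca
  set cc : Int := (List.count "C" xs : Int) with hcc
  set cg : Int := (List.count "G" xs : Int) with hcg
  set ct : Int := (List.count "T" xs : Int) with hct
  have hne : PySem.List.sorted [ca, cc, cg, ct] (fun x => x) false ≠ [] := by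
    have := PySem.List.length_sorted [ca, cc, cg, ct] (fun x => x) false
    intro h; rw [h] at this; simp at this
  rw [PySem.List.pyGetD_neg_one _ _ hne]
  set m : Int := (PySem.List.sorted [ca, cc, cg, ct] (fun x => x) false).getLast hne with hm
  have hperm := PySem.List.sorted_perm [ca, cc, cg, ct] (fun x => x) false
  have hmem : m ∈ [ca, cc, cg, ct] :=
    hperm.mem_iff.mp (List.getLast_mem hne)
  have hub : ∀ x ∈ [ca, cc, cg, ct], x ≤ m := by
    intro x hx
    exact le_getLast_of_pairwise
      (by simpa using PySem.List.sorted_pairwise [ca, cc, cg, ct] (fun x => x)) hne x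
      (hperm.mem_iff.mpr hx)
  have hz : ([ca, cc, cg, ct].zip ["A", "C", "G", "T"]) = [(ca,"A"),(cc,"C"),(cg,"G"),(ct,"T")] := rfl
  rw [hz, dict_pick ca cc cg ct m (by simpa using hmem)
    (hub ca (by simp)) (hub cc (by simp)) (hub cg (by simp)) (hub ct (by simp))]
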